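-- pv_equiv track=rewrite | github.com/seunpark06/Algorithm | 프로그래머스/1/72410. 신규 아이디 추천/신규 아이디 추천.py | solution
-- ===== SOURCE A (Python) =====
-- def solution(new_id):
--     answer = ''
--     # 1. 모든 대문자를 소문자로 변환
--     new_id = new_id.lower()
--     # 2. 규칙에 맞지 않는 문자를 제거
--     result = ''
--     for i in new_id:
--         if i.isalnum() or i in '-_.': #isalnum() => 알파벳, 숫자에 포함되는지 여부를 알려준다
--             result += i
--     new_id = result
--
--     # 3. 마침표가 2번이상 연속된 부분을 하나의 마침표로 치환
--     while ('..' in new_id):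
--         new_id = new_id.replace('..', '.')
--
--     # 4. 마침표가 처음이나 끝에 위치한다면 제거
--     if new_id[0:1] == '.': new_id = new_id[1:]
--     if new_id[-1:] == '.': new_id = new_id[:-1]
--
--     # 5. new_id가 빈 문자열이라면 new_id에 'a' 대입
--     if(len(new_id) == 0): new_id = 'a'
--
--     # 6. new_id 길이가 16자 이상이면, 첫 15개의 문자 제외한 나머지 문자 제거
--     # 제거 후 마침표가 new_id의 끝에 위치한다면 마침표 제거
--     if(len(new_id) >= 16): new_id = new_id[0:15]
--     if(new_id[-1:] == '.'): new_id = new_id[:-1]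
--
--     # 7. new_id 2자 이하라면, 마지막 문자를 길이가 3이 될 때까지 반복
--     while len(new_id) <= 2:
--         last = new_id[-1:]
--         new_id += last
--
--     return new_id
-- ===== SOURCE B (Python) =====
-- def solution(new_id):
--     # single streaming pass: lowercase+filter+collapse dots+no leading dot, all at once
--     s = []
--     for c in new_id.lower():
--         if c.isalnum() or c in '-_':
--             s.append(c)
--         elif c == '.' and s and s[-1] != '.':
--             s.append('.')
--     if s and s[-1] == '.':
--         s.pop()
--     s = s[:15]
--     if s and s[-1] == '.':
--         s.pop()
--     t = ''.join(s) or 'a'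
--     return (t + t[-1:] * 3)[:3] if len(t) < 3 else t
-- ===== Notes on version B (the rewrite author's own statement) =====
-- stated objective: alternative
-- what changed: One streaming pass with a last-character lookback replaces A's three separate cleanup stages (filter pass, repeated global replace of doubled dots until fixpoint, leading-dot strip), and the final pad-to-3 while loop becomes a closed-form slice; measured ~1.5x at large sizes but not consistently, so no speed is claimed.
import Mathlib
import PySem

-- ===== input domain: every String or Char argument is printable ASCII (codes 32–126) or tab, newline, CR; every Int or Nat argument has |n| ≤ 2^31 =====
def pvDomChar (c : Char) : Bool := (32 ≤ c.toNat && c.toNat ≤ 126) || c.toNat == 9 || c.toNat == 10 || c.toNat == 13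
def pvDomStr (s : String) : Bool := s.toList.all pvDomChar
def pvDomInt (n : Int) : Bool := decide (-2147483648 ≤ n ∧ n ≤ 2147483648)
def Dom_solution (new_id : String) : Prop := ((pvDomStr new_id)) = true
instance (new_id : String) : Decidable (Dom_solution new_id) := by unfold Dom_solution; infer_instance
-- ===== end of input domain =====

-- B replaces A's three separate cleanup stages (filter pass, repeated global
-- replacement of doubled dots until fixpoint, leading-dot strip) by ONE streaming pass
-- with a last-character lookback, and the final pad loop by a closed-form slice.

-- ===== PORT A =====
-- `while '..' in new_id: new_id = new_id.replace('..','.')`: each iteration with '..'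
-- present strictly shortens the string, so `length` iterations of fuel always suffice.
def whileDots : Nat → List Char → List Char
  | 0, s => s
  | fuel+1, s =>
    if PySem.Chars.isIn ['.', '.'] s then
      whileDots fuel (PySem.Chars.replace s ['.', '.'] ['.'])
    else s

-- `while len(new_id) <= 2: new_id += new_id[-1:]`: the loop body runs at most twice on
-- any string Python terminates on (length grows by 1 from ≥ 1), so fuel 3 suffices.
def padWhile : Nat → List Char → List Char
  | 0, s => s
  | fuel+1, s =>
    if s.length ≤ 2 then
      padWhile fuel (s ++ PySem.Chars.slice s (some (-1)) none)
    else s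

def solution (new_id : String) : String :=
  -- 1. lowercase
  let l0 := PySem.Chars.lower new_id.toList
  -- 2. keep alnum and '-', '_', '.'
  let result := l0.foldl (fun acc i =>
    if PySem.Chars.isalnum i || PySem.Chars.isIn [i] ['-', '_', '.'] then acc ++ [i]
    else acc) []
  -- 3. collapse '..' runs by repeated replace
  let s3 := whileDots result.length result
  -- 4. drop a leading and a trailing '.'
  let s4 := if PySem.Chars.slice s3 (some 0) (some 1) = ['.'] then PySem.Chars.slice s3 (some 1) none else s3
  let s5 := if PySem.Chars.slice s4 (some (-1)) none = ['.'] then PySem.Chars.slice s4 none (some (-1)) else s4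
  -- 5. empty -> "a"
  let s6 := if PySem.Chars.len s5 = 0 then ['a'] else s5
  -- 6. truncate to 15, then drop a trailing '.'
  let s7 := if 16 ≤ PySem.Chars.len s6 then PySem.Chars.slice s6 (some 0) (some 15) else s6
  let s8 := if PySem.Chars.slice s7 (some (-1)) none = ['.'] then PySem.Chars.slice s7 none (some (-1)) else s7
  -- 7. pad with the last character up to length 3
  String.ofList (padWhile 3 s8)


-- ===== PORT B =====
def solution_alt (new_id : String) : String :=
  -- one streaming pass: filter, collapse dot runs, and refuse a leading dot at once
  let s := (PySem.Chars.lower new_id.toList).foldl (fun s c =>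
    if PySem.Chars.isalnum c || PySem.Chars.isIn [c] ['-', '_'] then s ++ [c]
    else if c == '.' && !s.isEmpty && PySem.List.pyGetD s (-1) ' ' != '.' then s ++ ['.']
    else s) []
  -- drop a trailing dot (s.pop(); guarded, so pyGetD's default is never read)
  let s1 := if !s.isEmpty && PySem.List.pyGetD s (-1) ' ' == '.' then s.dropLast else s
  -- s[:15], then drop a trailing dot again
  let s2 := PySem.Chars.slice s1 none (some 15)
  let s3 := if !s2.isEmpty && PySem.List.pyGetD s2 (-1) ' ' == '.' then s2.dropLast else s2
  -- ''.join(s) or 'a'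
  let t := if s3.isEmpty then ['a'] else s3
  -- closed-form pad: (t + t[-1:]*3)[:3] if len(t) < 3 else t
  if t.length < 3 then
    String.ofList (PySem.Chars.slice
      (t ++ PySem.Chars.slice t (some (-1)) none ++ PySem.Chars.slice t (some (-1)) none
         ++ PySem.Chars.slice t (some (-1)) none) none (some 3))
  else String.ofList t



-- ===== PRECONDITION & SPEC =====
def Spec_solution (new_id : String) (out : String) : Prop := out = solution_alt new_id
instance (new_id : String) (out : String) : Decidable (Spec_solution new_id out) := by unfold Spec_solution; infer_instance

-- ===== CLAIM (what is proved, stated in full; the proofs are below) =====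
def Claim_equal_solution : Prop := ∀ (new_id : String), Dom_solution new_id → Spec_solution new_id (solution new_id)

-- ===== LEMMAS AND PROOFS =====

def rep : List Char → List Char
  | [] => []
  | c :: t =>
    if c = '.' ∧ t.head? = some '.' then '.' :: rep t.tail
    else c :: rep t
termination_by l => l.length
decreasing_by
  · exact Nat.lt_succ_of_le (by simp)
  · simp

lemma rep_go (fuel : Nat) (l acc : List Char) (h : l.length ≤ fuel) :
    PySem.Chars.replace.go ['.', '.'] ['.'] fuel l acc = acc.reverse ++ rep l := by
  induction fuel generalizing l acc with
  | zero =>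
    have : l = [] := by simpa using h
    subst this
    simp [PySem.Chars.replace.go, rep]
  | succ n ih =>
    match l with
    | [] => simp [PySem.Chars.replace.go, rep]
    | c :: t =>
      rw [PySem.Chars.replace.go]
      by_cases hp : List.isPrefixOf ['.', '.'] (c :: t) = true
      · have hc : c = '.' ∧ t.head? = some '.' := by
          cases t with
          | nil => simp [List.isPrefixOf] at hp
          | cons d t' =>
            simp [List.isPrefixOf] at hp
            exact ⟨hp.1.symm, by simp [hp.2.symm]⟩
        rw [if_pos hp, ih]
        · rw [rep, if_pos hc]
          cases t with
          | nil => exact absurd hc.2 (by simp)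
          | cons d t' => simp
        · cases t with
          | nil => exact absurd hc.2 (by simp)
          | cons d t' => simp at h ⊢; omega
      · have hc : ¬ (c = '.' ∧ t.head? = some '.') := by
          intro ⟨h1, h2⟩
          cases t with
          | nil => simp at h2
          | cons d t' =>
            simp at h2
            simp [List.isPrefixOf, h1, h2] at hp
        rw [if_neg hp, ih _ _ (by simp at h ⊢; omega)]
        rw [rep, if_neg hc]
        simp

lemma replace_eq_rep (l : List Char) :
    PySem.Chars.replace l ['.', '.'] ['.'] = rep l := by
  rw [PySem.Chars.replace]
  simp [rep_go l.length l [] le_rfl]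

lemma rep_length_le (l : List Char) : (rep l).length ≤ l.length := by
  fun_induction rep l with
  | case1 => simp
  | case2 c t h ih =>
    simp only [List.length_cons]
    have := @List.length_tail _ t
    omega
  | case3 c t h ih => simpa using ih

lemma rep_length_lt (l : List Char) (h : ['.', '.'] <:+: l) :
    (rep l).length < l.length := by
  fun_induction rep l with
  | case1 => simp at h
  | case2 c t hc ih =>
    obtain ⟨h1, h2⟩ := hc
    cases t with
    | nil => simp at h2
    | cons d t' =>
      have := rep_length_le t'
      simp at this ⊢
      omega
  | case3 c t hc ih =>
    rcases (List.infix_cons_iff.mp h) with hpre | hinf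
    · exfalso
      apply hc
      rcases hpre with ⟨r, hr⟩
      cases hr
      simp
    · simpa using ih hinf

def collapse : List Char → List Char
  | [] => []
  | c :: t =>
    if c = '.' then '.' :: collapse (t.dropWhile (· = '.'))
    else c :: collapse t
termination_by l => l.length
decreasing_by
  · simpa using Nat.lt_succ_of_le (List.length_dropWhile_le _ t)
  · simp

lemma collapse_eq_self (l : List Char) (h : ¬ ['.', '.'] <:+: l) : collapse l = l := by
  fun_induction collapse l with
  | case1 => rfl
  | case2 t ih =>
    have hd : t.dropWhile (· = '.') = t := by
      cases t with
      | nil => rfl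
      | cons d t' =>
        have hdne : d ≠ '.' := by
          intro hdd
          exact h ⟨[], t', by simp [hdd]⟩
        simp [List.dropWhile, hdne]
    rw [hd] at ih ⊢
    rw [ih]
    intro hinf
    exact h (hinf.trans ((List.suffix_cons '.' t).isInfix))
  | case3 c t hc ih =>
    rw [ih]
    intro hinf
    exact h (hinf.trans ((List.suffix_cons c t).isInfix))

lemma dropWhile_rep (l : List Char) :
    (rep l).dropWhile (· = '.') = rep (l.dropWhile (· = '.')) := by
  fun_induction rep l with
  | case1 => simp only [List.dropWhile]; rw [rep]
  | case2 c t h ih =>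
    obtain ⟨h1, h2⟩ := h
    cases t with
    | nil => simp at h2
    | cons d t' =>
      simp at h2
      subst h1 h2
      simpa [List.dropWhile] using ih
  | case3 c t h ih =>
    by_cases hc : c = '.'
    · subst hc
      have ht : t.dropWhile (· = '.') = t := by
        cases t with
        | nil => rfl
        | cons d t' =>
          have : d ≠ '.' := fun hd => h ⟨rfl, by simp [hd]⟩
          simp [List.dropWhile, this]
      have hrt : (rep t).dropWhile (· = '.') = rep t := by
        rw [ih, ht]
      simp [List.dropWhile, ht, hrt]
    · simp [List.dropWhile, hc]
      rw [rep, if_neg h]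

lemma collapse_rep_aux (n : Nat) : ∀ l : List Char, l.length ≤ n →
    collapse (rep l) = collapse l := by
  induction n with
  | zero =>
    intro l h
    have : l = [] := by simpa using h
    subst this; rw [rep]
  | succ n ih =>
    intro l h
    match l with
    | [] => rw [rep]
    | c :: t =>
      by_cases hc : c = '.' ∧ t.head? = some '.'
      · obtain ⟨h1, h2⟩ := hc
        cases t with
        | nil => simp at h2
        | cons d t' =>
          simp at h2
          subst h1 h2
          rw [rep, if_pos ⟨rfl, by simp⟩]
          simp only [List.tail_cons]
          rw [collapse, if_pos rfl, collapse, if_pos rfl, dropWhile_rep]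
          have hd : List.dropWhile (fun x => decide (x = '.')) ('.' :: t')
              = List.dropWhile (fun x => decide (x = '.')) t' := by
            simp [List.dropWhile]
          rw [hd, ih _ (le_trans (List.length_dropWhile_le _ _) (by simp at h; omega))]
      · rw [rep, if_neg hc]
        by_cases h1 : c = '.'
        · subst h1
          rw [collapse, if_pos rfl, collapse, if_pos rfl]
          rw [dropWhile_rep]
          congr 1
          rw [ih _ (le_trans (List.length_dropWhile_le _ _) (by simp at h; omega))]
        · rw [collapse, if_neg h1, collapse, if_neg h1]
          rw [ih _ (by simp at h; omega)]

lemma collapse_rep (l : List Char) : collapse (rep l) = collapse l :=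
  collapse_rep_aux l.length l le_rfl

lemma whileDots_eq_collapse (fuel : Nat) (l : List Char) (h : l.length ≤ fuel) :
    whileDots fuel l = collapse l := by
  induction fuel generalizing l with
  | zero =>
    have : l = [] := by simpa using h
    subst this
    rw [whileDots, collapse]
  | succ n ih =>
    rw [whileDots]
    by_cases hin : PySem.Chars.isIn ['.', '.'] l = true
    · have hinf := (PySem.Chars.isIn_iff_infix _ _).mp hin
      rw [hin, if_pos rfl, replace_eq_rep,
        ih _ (by have := rep_length_lt l hinf; omega), collapse_rep]
    · simp only [Bool.not_eq_true] at hin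
      rw [hin]
      simp only [Bool.false_eq_true, if_false]
      exact (collapse_eq_self l ((PySem.Chars.isIn_eq_false_iff _ _).mp hin)).symm

-- collapse output never contains '..'
lemma head?_collapse (l : List Char) : (collapse l).head? = l.head? := by
  fun_induction collapse l with
  | case1 => rfl
  | case2 t ih => rfl
  | case3 c t h ih => rfl

lemma noDD_collapse (l : List Char) : ¬ ['.', '.'] <:+: collapse l := by
  fun_induction collapse l with
  | case1 => simp
  | case2 t ih =>
    intro hinf
    rcases List.infix_cons_iff.mp hinf with hpre | hinf'
    · rcases hpre with ⟨r, hr⟩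
      have : (collapse (t.dropWhile (· = '.'))).head? = some '.' := by
        simp only [List.cons_append, List.nil_append, List.cons.injEq] at hr
        rw [← hr.2]
        simp
      rw [head?_collapse] at this
      have h2 := List.head?_dropWhile_not (· = '.') t
      rw [this] at h2
      simp at h2
    · exact ih hinf'
  | case3 c t h ih =>
    intro hinf
    rcases List.infix_cons_iff.mp hinf with hpre | hinf'
    · rcases hpre with ⟨r, hr⟩
      simp only [List.cons_append, List.nil_append, List.cons.injEq] at hr
      exact h hr.1.symm
    · exact ih hinf'

-- one leading-dot strip after collapse = collapse after dropping all leading dots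
lemma stripL_collapse (l : List Char) :
    (if (collapse l).head? = some '.' then (collapse l).tail else collapse l)
      = collapse (l.dropWhile (· = '.')) := by
  cases l with
  | nil => simp only [List.dropWhile]; rw [collapse]; simp
  | cons c t =>
    by_cases hc : c = '.'
    · subst hc
      rw [collapse, if_pos rfl]
      simp [List.dropWhile]
    · rw [collapse, if_neg hc]
      simp only [List.dropWhile, hc, decide_false]
      rw [show collapse (c :: t) = c :: collapse t from by rw [collapse, if_neg hc]]
      simp [hc]

lemma isIn_singleton (c : Char) (l : List Char) :
    PySem.Chars.isIn [c] l = true ↔ c ∈ l := by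
  rw [PySem.Chars.isIn_iff_infix, List.singleton_infix_iff]

lemma pB_ne_dot (c : Char)
    (h : (PySem.Chars.isalnum c || PySem.Chars.isIn [c] ['-', '_']) = true) : c ≠ '.' := by
  intro hc; subst hc
  rcases Bool.or_eq_true_iff.mp h with h1 | h1
  · exact absurd h1 (by decide)
  · exact absurd ((isIn_singleton _ _).mp h1) (by decide)

lemma pA_of_pB (c : Char)
    (h : (PySem.Chars.isalnum c || PySem.Chars.isIn [c] ['-', '_']) = true) :
    (PySem.Chars.isalnum c || PySem.Chars.isIn [c] ['-', '_', '.']) = true := by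
  rcases Bool.or_eq_true_iff.mp h with h1 | h1
  · simp [h1]
  · have := (isIn_singleton _ _).mp h1
    apply Bool.or_eq_true_iff.mpr; right
    apply (isIn_singleton _ _).mpr
    simp at this ⊢; tauto

lemma pA_dot : (PySem.Chars.isalnum '.' || PySem.Chars.isIn ['.'] ['-', '_', '.']) = true := by
  decide

lemma pA_false (c : Char) (hc : c ≠ '.')
    (h : (PySem.Chars.isalnum c || PySem.Chars.isIn [c] ['-', '_']) = false) :
    (PySem.Chars.isalnum c || PySem.Chars.isIn [c] ['-', '_', '.']) = false := by
  rcases Bool.or_eq_false_iff.mp h with ⟨h1, h2⟩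
  apply Bool.or_eq_false_iff.mpr
  refine ⟨h1, ?_⟩
  apply Bool.eq_false_iff.mpr
  intro h3
  have h4 := (isIn_singleton _ _).mp h3
  have h5 : c ∉ ['-', '_'] := fun hm => (Bool.eq_false_iff.mp h2) ((isIn_singleton _ _).mpr hm)
  simp at h4 h5
  tauto

lemma bfold (l : List Char) : ∀ acc : List Char,
    ((acc = [] ∨ acc.getLast? = some '.') →
      List.foldl (fun s c =>
        if PySem.Chars.isalnum c || PySem.Chars.isIn [c] ['-', '_'] then s ++ [c]
        else if c == '.' && !s.isEmpty && PySem.List.pyGetD s (-1) ' ' != '.' then s ++ ['.']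
        else s) acc l
      = acc ++ collapse ((l.filter (fun i => PySem.Chars.isalnum i || PySem.Chars.isIn [i] ['-', '_', '.'])).dropWhile (· = '.')))
    ∧ (acc ≠ [] → acc.getLast? ≠ some '.' →
      List.foldl (fun s c =>
        if PySem.Chars.isalnum c || PySem.Chars.isIn [c] ['-', '_'] then s ++ [c]
        else if c == '.' && !s.isEmpty && PySem.List.pyGetD s (-1) ' ' != '.' then s ++ ['.']
        else s) acc l
      = acc ++ collapse (l.filter (fun i => PySem.Chars.isalnum i || PySem.Chars.isIn [i] ['-', '_', '.']))) := by
  induction l with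
  | nil =>
    intro acc
    constructor
    · intro _; simp [List.filter]; rw [collapse]
    · intro _ _; simp [List.filter]; rw [collapse]
  | cons c t ih =>
    intro acc
    by_cases hB : (PySem.Chars.isalnum c || PySem.Chars.isIn [c] ['-', '_']) = true
    · -- append c, c ≠ '.'
      have hcd := pB_ne_dot c hB
      have hA := pA_of_pB c hB
      constructor
      all_goals intro _
      · rw [List.foldl_cons, if_pos hB,
          (ih (acc ++ [c])).2 (by simp) (by simp [hcd])]
        simp only [List.filter_cons, hA, if_pos]
        rw [List.dropWhile_cons, if_neg (by simp [hcd])]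
        rw [show collapse (c :: List.filter _ t) = c :: collapse (List.filter _ t) from by
          rw [collapse, if_neg hcd]]
        simp
      · intro _
        rw [List.foldl_cons, if_pos hB,
          (ih (acc ++ [c])).2 (by simp) (by simp [hcd])]
        simp only [List.filter_cons, hA, if_pos]
        rw [show collapse (c :: List.filter _ t) = c :: collapse (List.filter _ t) from by
          rw [collapse, if_neg hcd]]
        simp
    · have hBf : (PySem.Chars.isalnum c || PySem.Chars.isIn [c] ['-', '_']) = false :=
        Bool.eq_false_iff.mpr hB
      by_cases hcd : c = '.'
      · subst hcd
        constructor
        · intro hacc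
          have hskip : (('.' == '.' && !acc.isEmpty && PySem.List.pyGetD acc (-1) ' ' != '.')) = false := by
            rcases hacc with h0 | h0
            · subst h0; simp
            · have hne : acc ≠ [] := by intro h1; subst h1; simp at h0
              rw [PySem.List.pyGetD_neg_one acc ' ' hne]
              rw [List.getLast?_eq_getLast (h := hne)] at h0
              have h1 : acc.getLast hne = '.' := by simpa using h0
              simp [h1]
          rw [List.foldl_cons, if_neg hB, hskip]
          simp only [Bool.false_eq_true, if_false]
          rw [(ih acc).1 hacc]
          simp only [List.filter_cons, pA_dot, if_pos]
          rw [List.dropWhile_cons, if_pos (by simp)]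
        · intro hne hlast
          have htake : (('.' == '.' && !acc.isEmpty && PySem.List.pyGetD acc (-1) ' ' != '.')) = true := by
            rw [PySem.List.pyGetD_neg_one acc ' ' hne]
            rw [List.getLast?_eq_getLast (h := hne)] at hlast
            simp at hlast ⊢
            exact ⟨by simpa using hne, hlast⟩
          rw [List.foldl_cons, if_neg hB, htake]
          simp only [if_true]
          rw [(ih (acc ++ ['.'])).1 (by simp)]
          simp only [List.filter_cons, pA_dot, if_pos]
          rw [show collapse ('.' :: List.filter _ t) = '.' :: collapse ((List.filter _ t).dropWhile (· = '.')) from by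
            rw [collapse, if_pos rfl]]
          simp
      · have hAf := pA_false c hcd hBf
        have hskip : ((c == '.' && !acc.isEmpty && PySem.List.pyGetD acc (-1) ' ' != '.')) = false := by
          simp [hcd]
        constructor
        all_goals first
        | (intro hacc
           rw [List.foldl_cons, if_neg hB, hskip]
           simp only [Bool.false_eq_true, if_false]
           rw [(ih acc).1 hacc]
           simp only [List.filter_cons, hAf]
           simp)
        | (intro hne hlast
           rw [List.foldl_cons, if_neg hB, hskip]
           simp only [Bool.false_eq_true, if_false]
           rw [(ih acc).2 hne hlast]
           simp only [List.filter_cons, hAf]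
           simp)

def strip1 (x : List Char) : List Char := if x.getLast? = some '.' then x.dropLast else x

lemma stripA_head (x : List Char) :
    (if PySem.Chars.slice x (some 0) (some 1) = ['.'] then PySem.Chars.slice x (some 1) none else x)
      = (if x.head? = some '.' then x.tail else x) := by
  have h1 : PySem.Chars.slice x (some 0) (some 1) = x.take 1 := by
    simp [pysem]
  have h2 : PySem.Chars.slice x (some 1) none = x.tail := by
    have := PySem.List.slice_from_natCast x 1
    simp at this
    simp [pysem, this]
  rw [h1, h2]
  congr 1
  rw [List.take_one]
  cases x <;> simp

lemma stripA_eq (x : List Char) :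
    (if PySem.Chars.slice x (some (-1)) none = ['.'] then PySem.Chars.slice x none (some (-1)) else x)
      = strip1 x := by
  have h2 : PySem.Chars.slice x none (some (-1)) = x.dropLast := by
    simp [pysem, PySem.List.slice_to_neg_one]
  have h1 : PySem.Chars.slice x (some (-1)) none = x.drop (x.length - 1) := by
    simp [pysem, PySem.List.slice_from_neg_one]
  rw [h1, h2, strip1]
  congr 1
  cases hx : x.getLast? with
  | none =>
    have : x = [] := by simpa using hx
    subst this; simp
  | some a =>
    rcases List.getLast?_eq_some_iff.mp hx with ⟨ys, rfl⟩
    have hne : ys ++ [a] ≠ [] := by simp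
    rw [List.drop_length_sub_one hne]
    simp

lemma stripB_eq (x : List Char) :
    (if !x.isEmpty && PySem.List.pyGetD x (-1) ' ' == '.' then x.dropLast else x)
      = strip1 x := by
  rw [strip1]
  congr 1
  cases hx : x.getLast? with
  | none =>
    have : x = [] := by simpa using hx
    subst this; simp
  | some a =>
    have hne : x ≠ [] := by rintro rfl; simp at hx
    rw [PySem.List.pyGetD_neg_one x ' ' hne]
    rw [List.getLast?_eq_getLast (h := hne)] at hx
    have : x.getLast hne = a := by simpa using hx
    simp [hne, this]

lemma strip1_no_trailing (x : List Char) (h : ¬ ['.', '.'] <:+: x) :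
    (strip1 x).getLast? ≠ some '.' := by
  rw [strip1]
  by_cases hx : x.getLast? = some '.'
  · rw [if_pos hx]
    intro hy
    rcases List.getLast?_eq_some_iff.mp hx with ⟨ys, rfl⟩
    rw [List.dropLast_append_cons] at hy
    simp at hy
    rcases List.getLast?_eq_some_iff.mp hy with ⟨zs, rfl⟩
    exact h ⟨zs, [], by simp⟩
  · rw [if_neg hx]; exact hx

lemma trunc_eq (y : List Char) :
    (if 16 ≤ PySem.Chars.len y then PySem.Chars.slice y (some 0) (some 15) else y)
      = y.take 15 := by
  rw [PySem.Chars.len_eq]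
  split_ifs with h
  · have h15 : PySem.Chars.slice y (some 0) (some 15) = y.take 15 := by
      have := PySem.List.slice_to y (b := 15) (by norm_num)
      simp [pysem, this]
    exact h15
  · rw [List.take_of_length_le (by omega)]

lemma strip1_take_ne (y : List Char) (hne : y ≠ []) (hy : y.getLast? ≠ some '.') :
    strip1 (y.take 15) ≠ [] := by
  have hw : y.take 15 ≠ [] := by simp [hne]
  rw [strip1]
  split_ifs with h
  · intro hcon
    have hlen : (y.take 15).length = 1 := by
      have := List.length_dropLast (xs := y.take 15)
      have h1 : (y.take 15).length ≠ 0 := by simp [hne]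
      rw [List.eq_nil_iff_length_eq_zero] at hcon
      omega
    have hylen : y.length = 1 := by
      have := List.length_take (i := 15) (l := y)
      have h0 : y.length ≠ 0 := by simp [hne]
      omega
    rw [List.take_of_length_le (by omega)] at h
    exact hy h
  · exact hw

lemma padEq (z : List Char) (hz : z ≠ []) :
    String.ofList (padWhile 3 z)
      = if z.length < 3 then
          String.ofList (PySem.Chars.slice
            (z ++ PySem.Chars.slice z (some (-1)) none ++ PySem.Chars.slice z (some (-1)) none
               ++ PySem.Chars.slice z (some (-1)) none) none (some 3))
        else String.ofList z := by
  have h3 : ∀ w : List Char, PySem.Chars.slice w none (some 3) = w.take 3 := by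
    intro w
    have := PySem.List.slice_to w (b := 3) (by norm_num)
    simp [pysem, this]
  match z, hz with
  | [a], _ =>
    simp [padWhile, pysem, PySem.List.slice, PySem.List.clampIdx]
  | [a, b], _ =>
    simp [padWhile, pysem, PySem.List.slice, PySem.List.clampIdx]
  | a :: b :: c :: r, _ =>
    rw [padWhile]
    simp

lemma main_eq (new_id : String) : solution new_id = solution_alt new_id := by
  rw [solution, solution_alt]
  rw [PySem.List.foldl_append_if
    (fun i => PySem.Chars.isalnum i || PySem.Chars.isIn [i] ['-', '_', '.'])
    (fun i => i) (PySem.Chars.lower new_id.toList) []]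
  simp only [List.map_id', List.nil_append]
  rw [whileDots_eq_collapse _ _ le_rfl]
  rw [stripA_head, stripL_collapse]
  rw [(bfold (PySem.Chars.lower new_id.toList) []).1 (Or.inl rfl)]
  simp only [List.nil_append]
  rw [stripA_eq, stripA_eq, stripB_eq, stripB_eq]
  set X := collapse ((List.filter (fun i => PySem.Chars.isalnum i || PySem.Chars.isIn [i] ['-', '_', '.']) (PySem.Chars.lower new_id.toList)).dropWhile (· = '.')) with hX
  have hXdd : ¬ ['.', '.'] <:+: X := noDD_collapse _
  set y := strip1 X with hy
  have hyT : y.getLast? ≠ some '.' := strip1_no_trailing X hXdd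
  by_cases hyE : y = []
  · rw [hyE]
    decide
  · have hlen0 : ¬ (PySem.Chars.len y = 0) := by
      rw [PySem.Chars.len_eq]
      intro h
      exact hyE (List.eq_nil_iff_length_eq_zero.mpr (by exact_mod_cast h))
    rw [if_neg hlen0, trunc_eq]
    have hB15 : PySem.Chars.slice y none (some 15) = y.take 15 := by
      have := PySem.List.slice_to y (b := 15) (by norm_num)
      simp [pysem, this]
    rw [hB15]
    set z := strip1 (y.take 15) with hzdef
    have hzne := strip1_take_ne y hyE hyT
    have ht : (if z.isEmpty = true then ['a'] else z) = z := by
      rw [hzdef] at *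
      simp [hzne]
    rw [ht]
    exact padEq z hzne

-- ===== VERDICT (by name: the statement is the Claim_ definition above) =====
theorem solution_spec : Claim_equal_solution := by
  intro new_id _
  exact main_eq new_id
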